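-- pv_equiv track=rewrite | github.com/ARCAFF/ARCCnet | arccnet/models/cutout_classification/utilities_cutout.py | count_and_check_bars
-- ===== SOURCE A (Python) =====
-- def count_and_check_bars(matrix):
--     """
--     Determines whether a given matrix has consecutive lines (rows)
--     that are entirely composed of 0 values and counts these lines.
--
--     Returns:
--     - tuple (bool, int): A tuple where the first element is a boolean indicating whether
--         at least one instance of consecutive zero lines was found, and the second element
--         is the total count of lines that are part of such consecutive zero sequences.
--     """
--     count = 0  # Initialize count of consecutive zero lines
--     found_consecutive_zeros = False  # Flag to indicate if consecutive zero lines are found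
--
--     for i in range(len(matrix) - 1):
--         if all(value == 0 for value in matrix[i]) and all(value == 0 for value in matrix[i + 1]):
--             if not found_consecutive_zeros:  # If it's the first occurrence, count both lines
--                 count += 2
--                 found_consecutive_zeros = True
--             else:  # For additional consecutive lines, count only the next line
--                 count += 1
--     return found_consecutive_zeros, count
-- ===== SOURCE B (Python) =====
-- def count_and_check_bars(matrix):
--     # Run-length decomposition: collect lengths of maximal blocks of all-zero
--     # rows, then p = sum(L - 1) over blocks (= number of adjacent zero pairs).
--     runs = []
--     cur = 0
--     for row in matrix:
--         if any(v != 0 for v in row):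
--             if cur:
--                 runs.append(cur)
--             cur = 0
--         else:
--             cur += 1
--     if cur:
--         runs.append(cur)
--     p = sum(L - 1 for L in runs)
--     return (p > 0, p + 1 if p > 0 else 0)
-- ===== Notes on version B (the rewrite author's own statement) =====
-- stated objective: alternative
-- what changed: Replaces A's adjacent-pair scan with a stateful flag/counter by a run-length decomposition: collect the lengths of maximal all-zero blocks, sum (L-1) over the blocks, and return the closed form (p > 0, p + 1 if p > 0 else 0).
import Mathlib
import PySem

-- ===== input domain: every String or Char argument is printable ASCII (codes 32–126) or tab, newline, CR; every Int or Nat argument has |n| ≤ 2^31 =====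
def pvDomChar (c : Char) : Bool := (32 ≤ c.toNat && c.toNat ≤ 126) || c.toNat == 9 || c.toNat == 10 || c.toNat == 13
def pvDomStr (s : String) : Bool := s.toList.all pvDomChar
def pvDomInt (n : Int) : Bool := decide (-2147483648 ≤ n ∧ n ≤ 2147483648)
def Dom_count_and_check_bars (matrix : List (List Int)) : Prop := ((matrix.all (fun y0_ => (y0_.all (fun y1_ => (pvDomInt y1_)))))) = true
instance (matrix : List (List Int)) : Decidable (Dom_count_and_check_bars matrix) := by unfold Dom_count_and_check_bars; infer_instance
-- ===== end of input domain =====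

-- B replaces A's adjacent-pair scan with a flag/counter by a run-length decomposition
-- (lengths of maximal all-zero blocks, p = Σ(L-1)) and the closed form (p > 0, p + 1 or 0).

-- ===== PORT A =====
def pvRowZero (r : List Int) : Bool := r.all (fun v => v == 0)

def pvPairZero (matrix : List (List Int)) (i : Nat) : Bool :=
  pvRowZero (matrix.getD i []) && pvRowZero (matrix.getD (i + 1) [])

def pvStepA (matrix : List (List Int)) (st : Bool × Int) (i : Nat) : Bool × Int :=
  if pvPairZero matrix i then
    if !st.1 then (true, st.2 + 2) else (st.1, st.2 + 1)
  else st

def count_and_check_bars (matrix : List (List Int)) : Bool × Int :=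
  let r := (List.range (matrix.length - 1)).foldl (pvStepA matrix) (false, 0)
  (r.1, r.2)

-- ===== PORT B =====
def pvStepB (st : List Nat × Nat) (row : List Int) : List Nat × Nat :=
  if row.any (fun v => !(v == 0)) then
    ((if st.2 ≠ 0 then st.1 ++ [st.2] else st.1), 0)
  else (st.1, st.2 + 1)

def count_and_check_bars_alt (matrix : List (List Int)) : Bool × Int :=
  let st := matrix.foldl pvStepB ([], 0)
  let runs := if st.2 ≠ 0 then st.1 ++ [st.2] else st.1
  let p : Nat := (runs.map (fun L => L - 1)).sum
  (decide (p > 0), if p > 0 then (p : Int) + 1 else 0)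

-- ===== PRECONDITION & SPEC =====
def Spec_count_and_check_bars (matrix : List (List Int)) (out : Bool × Int) : Prop := out = count_and_check_bars_alt matrix
instance (matrix : List (List Int)) (out : Bool × Int) : Decidable (Spec_count_and_check_bars matrix out) := by unfold Spec_count_and_check_bars; infer_instance

-- ===== CLAIM (what is proved, stated in full; the proofs are below) =====
def Claim_equal_count_and_check_bars : Prop := ∀ (matrix : List (List Int)), Dom_count_and_check_bars matrix → Spec_count_and_check_bars matrix (count_and_check_bars matrix)

-- ===== LEMMAS AND PROOFS =====

-- number of adjacent all-zero pairs when a run of `cur` zero rows precedes `rows`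
def pvG (cur : Nat) : List (List Int) → Nat
  | [] => cur - 1
  | row :: rest => if pvRowZero row then pvG (cur + 1) rest else (cur - 1) + pvG 0 rest

theorem pvLoopA (matrix : List (List Int)) (n : Nat) :
    (List.range n).foldl (pvStepA matrix) (false, 0) =
      (decide (0 < ((List.range n).filter (pvPairZero matrix)).length),
        if 0 < ((List.range n).filter (pvPairZero matrix)).length
        then (((List.range n).filter (pvPairZero matrix)).length : Int) + 1
        else 0) := by
  induction n with
  | zero => simp
  | succ n ih =>
    rw [List.range_succ, List.foldl_append, List.filter_append, ih]
    simp only [List.foldl_cons, List.foldl_nil, List.filter_singleton, pvStepA,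
      List.length_append]
    set c := ((List.range n).filter (pvPairZero matrix)).length with hc
    by_cases h : pvPairZero matrix n = true
    · by_cases h0 : 0 < c
      · simp only [h, h0, cond_true, List.length_singleton, if_true, decide_true,
          Bool.not_true, Bool.false_eq_true, if_false, Prod.mk.injEq]
        have h1 : 0 < c + 1 := by omega
        simp only [h1, if_true, decide_true, true_and]
        push_cast
        ring
      · have hc0 : c = 0 := by omega
        simp [h, hc0]
    · simp only [h, Bool.false_eq_true, if_false, cond_false, List.length_nil, Nat.add_zero]

theorem pvAnyNotZero (row : List Int) :
    (row.any (fun v => !(v == 0))) = !pvRowZero row := by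
  simp [pvRowZero, List.all_eq_not_any_not]

theorem pvB_fold (rows : List (List Int)) : ∀ runs cur,
    (((if (rows.foldl pvStepB (runs, cur)).2 ≠ 0
        then (rows.foldl pvStepB (runs, cur)).1 ++ [(rows.foldl pvStepB (runs, cur)).2]
        else (rows.foldl pvStepB (runs, cur)).1).map (fun L => L - 1)).sum)
      = ((runs.map (fun L => L - 1)).sum + pvG cur rows) := by
  induction rows with
  | nil =>
    intro runs cur
    by_cases h : cur = 0 <;> simp [pvG, h]
  | cons row rest ih =>
    intro runs cur
    simp only [List.foldl_cons, pvStepB, pvAnyNotZero, pvG]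
    cases hz : pvRowZero row with
    | true =>
      simp only [Bool.not_true, Bool.false_eq_true, if_false, if_pos]
      exact ih runs (cur + 1)
    | false =>
      simp only [Bool.not_false, Bool.false_eq_true, if_false, if_pos]
      rw [ih]
      by_cases hc : cur = 0
      · simp [hc]
      · simp only [hc, ne_eq, not_false_iff, if_pos]
        simp only [List.map_append, List.sum_append, List.map_cons, List.map_nil,
          List.sum_cons, List.sum_nil]
        omega

theorem pvG_succ (rest : List (List Int)) : ∀ c, pvG (c + 1) rest = c + pvG 1 rest := by
  induction rest with
  | nil => intro c; simp [pvG]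
  | cons r t ih =>
    intro c
    by_cases hz : pvRowZero r = true
    · have h1 : pvG (c + 1) (r :: t) = pvG (c + 1 + 1) t := by simp [pvG, hz]
      have h2 : pvG 1 (r :: t) = pvG (1 + 1) t := by simp [pvG, hz]
      rw [h1, h2, ih (c + 1), ih 1]
      omega
    · have h1 : pvG (c + 1) (r :: t) = (c + 1 - 1) + pvG 0 t := by simp [pvG, hz]
      have h2 : pvG 1 (r :: t) = (1 - 1) + pvG 0 t := by simp [pvG, hz]
      rw [h1, h2]
      omega

theorem pvG_one (rest : List (List Int)) :
    pvG 1 rest = (match rest with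
      | [] => 0
      | r :: _ => if pvRowZero r then 1 else 0) + pvG 0 rest := by
  cases rest with
  | nil => simp [pvG]
  | cons r t =>
    by_cases hz : pvRowZero r = true
    · have h1 : pvG 1 (r :: t) = pvG (1 + 1) t := by simp [pvG, hz]
      have h2 : pvG 0 (r :: t) = pvG 1 t := by simp [pvG, hz]
      rw [h1, h2, pvG_succ t 1]
      simp [hz]
    · simp [pvG, hz]

theorem pvFilterG : ∀ (matrix : List (List Int)),
    ((List.range (matrix.length - 1)).filter (pvPairZero matrix)).length = pvG 0 matrix := by
  intro matrix
  induction matrix with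
  | nil => simp [pvG]
  | cons a rest ih =>
    cases rest with
    | nil =>
      simp only [List.length_cons, List.length_nil]
      by_cases hz : pvRowZero a = true <;> simp [pvG, hz]
    | cons b t =>
      have hlen : (a :: b :: t).length - 1 = (b :: t).length := by simp
      rw [hlen]
      have hr : (b :: t).length = t.length + 1 := by simp
      rw [hr, List.range_succ_eq_map]
      simp only [List.filter_cons]
      have hshift : ((List.range t.length).map (· + 1)).filter (pvPairZero (a :: b :: t)) =
          ((List.range t.length).filter (fun i => pvPairZero (b :: t) i)).map (· + 1) := by
        rw [List.filter_map]
        congr 1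
      have h0 : pvPairZero (a :: b :: t) 0 = (pvRowZero a && pvRowZero b) := by
        simp [pvPairZero]
      have hlen2 : ((b :: t).length - 1) = t.length := by simp
      rw [hlen2] at ih
      by_cases hz : pvRowZero a = true
      · have hG : pvG 0 (a :: b :: t) = pvG 1 (b :: t) := by simp [pvG, hz]
        rw [hG, pvG_one (b :: t)]
        by_cases hzb : pvRowZero b = true
        · simp only [h0, hz, hzb, Bool.and_self, if_true, List.length_cons]
          rw [hshift, List.length_map, ih]
          omega
        · simp only [h0, hz, hzb, Bool.and_false, Bool.false_eq_true, if_false]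
          rw [hshift, List.length_map, ih]
          simp
      · have hG : pvG 0 (a :: b :: t) = pvG 0 (b :: t) := by simp [pvG, hz]
        rw [hG]
        simp only [h0, hz, Bool.false_and, Bool.false_eq_true, if_false]
        rw [hshift, List.length_map, ih]

-- ===== VERDICT (by name: the statement is the Claim_ definition above) =====
theorem count_and_check_bars_spec : Claim_equal_count_and_check_bars := by
  intro matrix _
  unfold Spec_count_and_check_bars count_and_check_bars count_and_check_bars_alt
  have hb := pvB_fold matrix [] 0
  simp only [List.map_nil, List.sum_nil, Nat.zero_add] at hb
  simp only [pvLoopA, hb, pvFilterG]
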